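-- pv_equiv track=rewrite | github.com/emretezel/pyvalue | src/pyvalue/metrics/owner_earnings_equity.py | _combine_currency
-- ===== SOURCE A (Python) =====
-- from typing import Optional, Sequence
--
-- def _combine_currency(values: Sequence[Optional[str]]) -> Optional[str]:
--     merged = None
--     for value in values:
--         if not value:
--             continue
--         if merged is None:
--             merged = value
--         elif merged != value:
--             return None
--     return merged
-- ===== SOURCE B (Python) =====
-- from typing import Optional, Sequence
--
-- def _combine_currency(values: Sequence[Optional[str]]) -> Optional[str]:
--     distinct = {v for v in values if v}
--     return next(iter(distinct)) if len(distinct) == 1 else None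
-- ===== Notes on version B (the rewrite author's own statement) =====
-- stated objective: simpler
-- what changed: Replaces the running merged-value loop with early exit by one set comprehension of the distinct truthy values followed by a branch on its cardinality.
import Mathlib
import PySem

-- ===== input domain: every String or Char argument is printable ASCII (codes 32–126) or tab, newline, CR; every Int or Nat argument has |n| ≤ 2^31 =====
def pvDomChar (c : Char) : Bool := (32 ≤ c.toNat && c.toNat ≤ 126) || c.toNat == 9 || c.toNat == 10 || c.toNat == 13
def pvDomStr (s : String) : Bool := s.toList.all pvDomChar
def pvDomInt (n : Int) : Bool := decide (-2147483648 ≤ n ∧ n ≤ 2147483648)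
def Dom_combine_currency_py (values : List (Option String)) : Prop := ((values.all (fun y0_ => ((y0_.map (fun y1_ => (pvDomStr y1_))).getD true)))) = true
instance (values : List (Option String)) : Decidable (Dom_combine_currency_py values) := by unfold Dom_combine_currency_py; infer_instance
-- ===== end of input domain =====

-- B replaces A's running merged value (with early exit) by one set comprehension of the
-- distinct truthy values and a branch on its cardinality: simpler.

-- ===== PORT A =====
-- the for-loop over `values` with accumulator `merged`, early `return None` on conflict
def combineGoA : List (Option String) → Option String → Option String
  | [], merged => merged
  | v :: rest, merged =>
    match v with
    | none => combineGoA rest merged          -- `if not value: continue`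
    | some s =>
      if s = "" then combineGoA rest merged   -- empty string is falsy: continue
      else
        match merged with
        | none => combineGoA rest (some s)
        | some m => if m ≠ s then none else combineGoA rest merged

def combine_currency_py (values : List (Option String)) : Option String :=
  combineGoA values none

-- ===== PORT B =====
-- truthy filter of the comprehension: keeps v when `if v` holds
def pvTruthy (v : Option String) : Option String :=
  match v with
  | none => none
  | some s => if s ≠ "" then some s else none

def combine_currency_py_alt (values : List (Option String)) : Option String :=
  let distinct : PySem.Set String := PySem.Set.ofList (values.filterMap pvTruthy)
  if PySem.Set.len distinct = 1 then distinct.head? else none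

-- ===== PRECONDITION & SPEC =====
def Spec_combine_currency_py (values : List (Option String)) (out : Option String) : Prop := out = combine_currency_py_alt values
instance (values : List (Option String)) (out : Option String) : Decidable (Spec_combine_currency_py values out) := by unfold Spec_combine_currency_py; infer_instance

-- ===== CLAIM (what is proved, stated in full; the proofs are below) =====
def Claim_equal_combine_currency_py : Prop := ∀ (values : List (Option String)), Dom_combine_currency_py values → Spec_combine_currency_py values (combine_currency_py values)

-- ===== LEMMAS AND PROOFS =====

theorem add_self (s : String) (acc : List String) (h : s ∈ acc) :
    PySem.Set.add acc s = acc := by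
  simp [PySem.Set.add, PySem.Set.contains, h]

theorem foldl_add_const (L : List String) (s : String) (acc : List String) (hs : s ∈ acc)
    (h : L.all (· == s) = true) : L.foldl PySem.Set.add acc = acc := by
  induction L with
  | nil => rfl
  | cons x rest ih =>
    simp only [List.all_cons, Bool.and_eq_true, beq_iff_eq] at h
    obtain ⟨hx, hrest⟩ := h
    subst hx
    simpa [add_self x acc hs] using ih hrest

theorem length_le_foldl_add (L : List String) (acc : List String) :
    acc.length ≤ (L.foldl PySem.Set.add acc).length := by
  induction L generalizing acc with
  | nil => simp
  | cons x rest ih =>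
    refine le_trans ?_ (ih (PySem.Set.add acc x))
    simp only [PySem.Set.add]
    split <;> simp

theorem foldl_add_two (L : List String) (s : String)
    (h : L.all (· == s) = false) : 2 ≤ (L.foldl PySem.Set.add [s]).length := by
  induction L with
  | nil => simp at h
  | cons x rest ih =>
    by_cases hx : x = s
    · subst hx
      simp only [List.all_cons, beq_self_eq_true, Bool.true_and] at h
      simpa [add_self x [x] (by simp)] using ih h
    · have hadd : PySem.Set.add [s] x = [s, x] := by
        simp [PySem.Set.add, PySem.Set.contains, hx]
      calc 2 = ([s, x] : List String).length := rfl
        _ ≤ _ := by rw [List.foldl_cons, hadd]; exact length_le_foldl_add rest [s, x]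

theorem goA_some (values : List (Option String)) (m : String) :
    combineGoA values (some m) =
      if (values.filterMap pvTruthy).all (· == m) then some m else none := by
  induction values with
  | nil => simp [combineGoA]
  | cons v rest ih =>
    match v with
    | none => simpa [combineGoA, pvTruthy] using ih
    | some s =>
      by_cases hs : s = ""
      · subst hs; simpa [combineGoA, pvTruthy] using ih
      · simp only [combineGoA, pvTruthy, hs, if_neg, ne_eq, not_false_eq_true, if_pos,
          List.filterMap_cons]
        by_cases hms : m = s
        · subst hms
          simpa [List.all_cons, pvTruthy] using ih
        · simp [hms, List.all_cons, Ne.symm hms]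

theorem ofList_cons_eq (s : String) (L : List String) :
    PySem.Set.ofList (s :: L) = L.foldl PySem.Set.add [s] := by
  simp [PySem.Set.ofList_eq_foldl, PySem.Set.add, PySem.Set.contains]

theorem goA_none (values : List (Option String)) :
    combineGoA values none = combine_currency_py_alt values := by
  induction values with
  | nil => rfl
  | cons v rest ih =>
    match v with
    | none =>
      simpa [combineGoA, combine_currency_py_alt, pvTruthy] using ih
    | some s =>
      by_cases hs : s = ""
      · subst hs
        simpa [combineGoA, combine_currency_py_alt, pvTruthy] using ih
      · simp only [combineGoA, hs, not_false_eq_true, if_neg]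
        rw [goA_some]
        have hcons : (some s :: rest).filterMap pvTruthy = s :: rest.filterMap pvTruthy := by
          simp [pvTruthy, hs]
        by_cases hall : (rest.filterMap pvTruthy).all (· == s) = true
        · have hset : PySem.Set.ofList ((some s :: rest).filterMap pvTruthy) = [s] := by
            rw [hcons, ofList_cons_eq]
            exact foldl_add_const _ s [s] (by simp) hall
          simp [combine_currency_py_alt, hset, hall, PySem.Set.len]
        · have h2 : 2 ≤ (PySem.Set.ofList ((some s :: rest).filterMap pvTruthy)).length := by
            rw [hcons, ofList_cons_eq]
            exact foldl_add_two _ s (by simpa using hall)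
          simp only [combine_currency_py_alt, PySem.Set.len, hall, Bool.false_eq_true,
            if_false]
          rw [if_neg (by omega)]

-- ===== VERDICT (by name: the statement is the Claim_ definition above) =====
theorem combine_currency_py_spec : Claim_equal_combine_currency_py := by
  intro values _
  show combine_currency_py values = combine_currency_py_alt values
  exact goA_none values
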